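-- pv_equiv track=rewrite | github.com/kepler471/katas | lettersHistogram/letters_histogram.py | vertical_histogram_of_orig
-- ===== SOURCE A (Python) =====
-- def vertical_histogram_of_orig(s):
--     chars = set(s)
--     hist = {c: s.count(c) for c in chars if c.isupper()}
--
--     # Default arg accounts for empty string input
--     height = max(hist.values(), default=0)
--     keys_ord = sorted(hist.keys())
--
--     output = []
--     for h in range(height, 0, -1):
--         line = ""
--         for k in keys_ord:
--             if h <= hist[k]:
--                 line += "*"
--             else:
--                 line += " "
--         output.append(" ".join(line.rstrip()))
--     output.append(" ".join(keys_ord))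
--
--     return "\n".join(output)
-- ===== SOURCE B (Python) =====
-- def vertical_histogram_of_orig(s):
--     counts = {}
--     for c in s:
--         if c.isupper():
--             counts[c] = counts.get(c, 0) + 1
--
--     keys = sorted(counts)
--     height = max(counts.values(), default=0)
--
--     # One column per key, built independently, then transposed into rows.
--     cols = [['*' if h <= counts[k] else ' ' for h in range(height, 0, -1)] for k in keys]
--     rows = [' '.join(''.join(row).rstrip()) for row in zip(*cols)]
--
--     return '\n'.join(rows + [' '.join(keys)])
-- ===== Notes on version B (the rewrite author's own statement) =====
-- stated objective: alternative
-- what changed: B counts uppercase letters in one pass over the string (dict counter instead of set(s) plus per-char s.count) and builds one column per key independently, then transposes the columns with zip(*cols) to get the rows, instead of A's row-by-row double loop over range(height)xkeys.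
import Mathlib
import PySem

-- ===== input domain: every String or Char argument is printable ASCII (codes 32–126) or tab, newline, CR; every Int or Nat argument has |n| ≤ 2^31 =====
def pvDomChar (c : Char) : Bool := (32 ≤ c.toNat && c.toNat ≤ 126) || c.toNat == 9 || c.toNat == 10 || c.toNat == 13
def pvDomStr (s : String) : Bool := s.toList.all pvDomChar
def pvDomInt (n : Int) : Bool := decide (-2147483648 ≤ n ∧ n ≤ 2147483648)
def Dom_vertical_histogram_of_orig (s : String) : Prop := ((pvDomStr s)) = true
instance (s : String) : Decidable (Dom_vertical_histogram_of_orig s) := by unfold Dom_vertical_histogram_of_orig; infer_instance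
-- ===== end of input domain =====

-- B rebuilds the histogram column-by-column and transposes, instead of A's row×key double loop; same output, alternative decomposition.

-- ===== PORT A =====
-- literal port of A: set of chars, dict comprehension with s.count, then a row loop over range(height,0,-1)
-- with an inner loop over the sorted keys.  hist[k] is ported as getD k 0: every k looked up is a key of hist,
-- so the lookup never misses (Python would raise KeyError only on a missing key).
def vertical_histogram_of_orig (s : String) : String :=
  let l := s.toList
  let chars : PySem.Set Char := PySem.Set.ofList l
  let hist : PySem.Dict Char Int :=
    chars.foldl (fun d c => if PySem.Chars.isupper c then d.insert c ((PySem.Chars.count l [c] : Nat) : Int) else d) PySem.Dict.empty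
  let height : Int := PySem.List.maxD hist.values (fun v => v) 0
  let keys_ord := PySem.List.sorted hist.keys (fun k => k) false
  let output := (PySem.List.pyRange height 0 (-1)).foldl (fun out h =>
      let line := keys_ord.foldl (fun line k =>
        if h ≤ hist.getD k 0 then line ++ ['*'] else line ++ [' ']) ([] : List Char)
      out ++ [PySem.Chars.join [' '] ((PySem.Chars.rstrip line).map (fun c => [c]))]) []
  let output := output ++ [PySem.Chars.join [' '] (keys_ord.map (fun c => [c]))]
  String.mk (PySem.Chars.join ['\n'] output)

-- ===== PORT B =====
-- zip(*cols) on equal-length columns: Python tuples rendered as lists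
def pvTranspose : List (List Char) → List (List Char)
  | [] => []
  | [c] => c.map (fun x => [x])
  | c :: d :: rest => List.zipWith (fun x r => x :: r) c (pvTranspose (d :: rest))

def vertical_histogram_of_orig_alt (s : String) : String :=
  let counts : PySem.Dict Char Int :=
    s.toList.foldl (fun d c => if PySem.Chars.isupper c then d.insert c (d.getD c 0 + 1) else d) PySem.Dict.empty
  let keys := PySem.List.sorted counts.keys (fun k => k) false
  let height : Int := PySem.List.maxD counts.values (fun v => v) 0
  let cols := keys.map (fun k => (PySem.List.pyRange height 0 (-1)).map (fun h => if h ≤ counts.getD k 0 then '*' else ' '))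
  let rows := (pvTranspose cols).map (fun row => PySem.Chars.join [' '] ((PySem.Chars.rstrip row).map (fun c => [c])))
  String.mk (PySem.Chars.join ['\n'] (rows ++ [PySem.Chars.join [' '] (keys.map (fun c => [c]))]))

-- ===== PRECONDITION & SPEC =====
def Spec_vertical_histogram_of_orig (s : String) (out : String) : Prop := out = vertical_histogram_of_orig_alt s
instance (s : String) (out : String) : Decidable (Spec_vertical_histogram_of_orig s out) := by unfold Spec_vertical_histogram_of_orig; infer_instance

-- ===== CLAIM (what is proved, stated in full; the proofs are below) =====
def Claim_equal_vertical_histogram_of_orig : Prop := ∀ (s : String), Dom_vertical_histogram_of_orig s → Spec_vertical_histogram_of_orig s (vertical_histogram_of_orig s)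

-- ===== LEMMAS AND PROOFS =====

-- s.count(c) with a single-character needle is the character count
lemma pv_count_go_single (c : Char) :
    ∀ (l : List Char) (fuel acc : Nat), l.length ≤ fuel →
      PySem.Chars.count.go [c] fuel l acc = acc + l.count c := by
  intro l
  induction l with
  | nil => intro fuel acc _; cases fuel <;> simp [PySem.Chars.count.go]
  | cons h t ih =>
    intro fuel acc hf
    cases fuel with
    | zero => simp at hf
    | succ n =>
      by_cases hc : c = h
      · subst hc
        have h1 := ih n (acc + 1) (by simp only [List.length_cons] at hf; omega)
        simp [PySem.Chars.count.go, List.isPrefixOf, h1]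
        omega
      · have hpre : ([c].isPrefixOf (h :: t)) = false := by
          simp [List.isPrefixOf]; exact fun h' => hc h'
        simp only [PySem.Chars.count.go, hpre, if_neg Bool.false_ne_true]
        rw [ih n acc (by simp only [List.length_cons] at hf; omega)]
        have hbc : (h == c) = false := by simp; exact fun h' => hc h'.symm
        simp [List.count_cons, hbc]

lemma pv_count_single (l : List Char) (c : Char) :
    PySem.Chars.count l [c] = l.count c := by
  simpa [PySem.Chars.count] using pv_count_go_single c l l.length 0 le_rfl

-- filtering commutes with building a set of first occurrences
lemma pv_filter_foldl_add (p : Char → Bool) :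
    ∀ (l : List Char) (acc : PySem.Set Char),
      (l.foldl PySem.Set.add acc).filter p = (l.filter p).foldl PySem.Set.add (acc.filter p) := by
  intro l
  induction l with
  | nil => intro acc; rfl
  | cons h t ih =>
    intro acc
    by_cases hp : p h
    · have hmem : (PySem.Set.add acc h).filter p = PySem.Set.add (acc.filter p) h := by
        by_cases hin : h ∈ acc
        · simp [PySem.Set.add, PySem.Set.contains, hin, hp]
        · simp [PySem.Set.add, PySem.Set.contains, hin, hp]
      simp only [List.foldl_cons, List.filter_cons, hp, ih, hmem]
      simp
    · have hmem : (PySem.Set.add acc h).filter p = acc.filter p := by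
        by_cases hin : h ∈ acc
        · simp [PySem.Set.add, PySem.Set.contains, hin]
        · simp [PySem.Set.add, PySem.Set.contains, hin, hp]
      simp only [List.foldl_cons, List.filter_cons, hp, ih, hmem]
      simp

lemma pv_filter_ofList (p : Char → Bool) (l : List Char) :
    (PySem.Set.ofList l).filter p = PySem.Set.ofList (l.filter p) := by
  simpa [PySem.Set.ofList, PySem.Set.empty] using pv_filter_foldl_add p l []

-- the items produced by A's filtered dict-comprehension fold over nodup keys
lemma pv_items_comprehension (q : Char → Bool) (f : Char → Int) :
    ∀ (ks : List Char) (d : PySem.Dict Char Int), ks.Nodup →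
      (∀ k ∈ ks, d.contains k = false) →
      (ks.foldl (fun d c => if q c then d.insert c (f c) else d) d).items
        = d.items ++ (ks.filter q).map (fun c => (c, f c)) := by
  intro ks
  induction ks with
  | nil => intro d _ _; simp
  | cons h t ih =>
    intro d hnd hfr
    have hdh : d.contains h = false := hfr h (by simp)
    by_cases hq : q h
    · have hstep : ∀ k ∈ t, (d.insert h (f h)).contains k = false := by
        intro k hk
        have hne : k ≠ h := fun e => (List.nodup_cons.mp hnd).1 (e ▸ hk)
        rw [PySem.Dict.contains_insert]
        simp [hne, hfr k (by simp [hk])]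
      simp only [List.foldl_cons, hq, if_pos, List.filter_cons_of_pos hq, List.map_cons]
      rw [ih (d.insert h (f h)) (List.nodup_cons.mp hnd).2 hstep,
        PySem.Dict.items_insert_of_not_contains d (f h) hdh]
      simp
    · simp only [List.foldl_cons, hq, if_neg Bool.false_ne_true, List.filter_cons_of_neg hq]
      exact ih d (List.nodup_cons.mp hnd).2 (fun k hk => hfr k (by simp [hk]))

-- A's dict equals B's dict
lemma pv_dict_eq (l : List Char) :
    (PySem.Set.ofList l).foldl
        (fun d c => if PySem.Chars.isupper c then d.insert c ((PySem.Chars.count l [c] : Nat) : Int) else d)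
        PySem.Dict.empty
      = l.foldl (fun d c => if PySem.Chars.isupper c then d.insert c (d.getD c 0 + 1) else d) PySem.Dict.empty := by
  apply PySem.Dict.ext
  have hB : l.foldl (fun d c => if PySem.Chars.isupper c then d.insert c (d.getD c 0 + 1) else d) PySem.Dict.empty
      = PySem.Dict.counter (l.filter PySem.Chars.isupper) := by
    rw [PySem.List.foldl_if_eq_foldl_filter, PySem.Dict.foldl_insert_getD_add_one_eq_counter]
  rw [hB, PySem.Dict.items_counter,
    pv_items_comprehension PySem.Chars.isupper
      (fun c => ((PySem.Chars.count l [c] : Nat) : Int))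
      (PySem.Set.ofList l) PySem.Dict.empty (PySem.Set.nodup_ofList l) (fun k _ => rfl),
    ← pv_filter_ofList]
  simp only [PySem.Dict.empty, List.nil_append]
  apply List.map_congr_left
  intro c hc
  have hup : PySem.Chars.isupper c = true := (List.mem_filter.mp hc).2
  rw [pv_count_single, List.count_filter hup]

-- transpose of a map-built matrix with nonempty key list
lemma pv_transpose_map (f : Char → Int → Char) (rng : List Int) :
    ∀ (ks : List Char), ks ≠ [] →
      pvTranspose (ks.map (fun k => rng.map (f k))) = rng.map (fun h => ks.map (fun k => f k h)) := by
  intro ks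
  induction ks with
  | nil => intro h; exact absurd rfl h
  | cons k t ih =>
    intro _
    cases t with
    | nil => simp [pvTranspose, List.map_map]
    | cons k' t' =>
      have hrec := ih (by simp)
      simp only [List.map_cons] at hrec ⊢
      simp only [pvTranspose, hrec]
      clear hrec ih
      induction rng with
      | nil => simp
      | cons r rs ihr => simp_all

-- the inner row loop of A is a map over the keys
lemma pv_line_eq (p : Char → Prop) [DecidablePred p] (ks : List Char) :
    ks.foldl (fun line k => if p k then line ++ ['*'] else line ++ [' ']) ([] : List Char)
      = ks.map (fun k => if p k then '*' else ' ') := by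
  rw [show (fun (line : List Char) k => if p k then line ++ ['*'] else line ++ [' '])
        = fun (line : List Char) k => line ++ [if p k then '*' else ' '] from
      funext fun _ => funext fun k => by split <;> rfl,
    PySem.List.foldl_append_singleton_eq_map]
  simp

-- everything downstream of the (equal) dicts: A's row loop equals B's transpose construction
lemma pv_assemble (d : PySem.Dict Char Int) :
    String.mk (PySem.Chars.join ['\n']
      (((PySem.List.pyRange (PySem.List.maxD d.values (fun v => v) 0) 0 (-1)).foldl (fun out h =>
          out ++ [PySem.Chars.join [' ']
            ((PySem.Chars.rstrip ((PySem.List.sorted d.keys (fun k => k) false).foldl (fun line k =>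
              if h ≤ d.getD k 0 then line ++ ['*'] else line ++ [' ']) ([] : List Char))).map (fun c => [c]))]) [])
        ++ [PySem.Chars.join [' '] ((PySem.List.sorted d.keys (fun k => k) false).map (fun c => [c]))]))
    = String.mk (PySem.Chars.join ['\n']
      (((pvTranspose ((PySem.List.sorted d.keys (fun k => k) false).map (fun k =>
            (PySem.List.pyRange (PySem.List.maxD d.values (fun v => v) 0) 0 (-1)).map (fun h =>
              if h ≤ d.getD k 0 then '*' else ' ')))).map (fun row =>
          PySem.Chars.join [' '] ((PySem.Chars.rstrip row).map (fun c => [c]))))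
        ++ [PySem.Chars.join [' '] ((PySem.List.sorted d.keys (fun k => k) false).map (fun c => [c]))])) := by
  generalize hks : PySem.List.sorted d.keys (fun k => k) false = ks
  generalize hrng : PySem.List.pyRange (PySem.List.maxD d.values (fun v => v) 0) 0 (-1) = rng
  congr 2
  rw [PySem.List.foldl_append_singleton_eq_map
      (f := fun h => PySem.Chars.join [' ']
        ((PySem.Chars.rstrip (ks.foldl (fun line k =>
          if h ≤ d.getD k 0 then line ++ ['*'] else line ++ [' ']) ([] : List Char))).map (fun c => [c])))]
  simp only [List.nil_append, pv_line_eq (fun k => _ ≤ d.getD k 0) ks]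
  by_cases hk : ks = []
  · subst hk
    have hkeys : d.keys = [] := (PySem.List.sorted_eq_nil_iff _ _ _).mp hks
    have hitems : d.items = [] := by
      have := hkeys
      simp only [PySem.Dict.keys, List.map_eq_nil_iff] at this
      exact this
    have hvals : d.values = [] := by simp [PySem.Dict.values, hitems]
    have : rng = [] := by rw [← hrng, hvals]; decide
    simp [this, pvTranspose]
  · rw [pv_transpose_map (fun k h => if h ≤ d.getD k 0 then '*' else ' ') rng ks hk, List.map_map]
    rfl

-- ===== VERDICT (by name: the statement is the Claim_ definition above) =====
theorem vertical_histogram_of_orig_spec : Claim_equal_vertical_histogram_of_orig := by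
  intro s _
  show vertical_histogram_of_orig s = vertical_histogram_of_orig_alt s
  simp only [vertical_histogram_of_orig, vertical_histogram_of_orig_alt]
  rw [pv_dict_eq s.toList]
  exact pv_assemble _
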